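-- pv_equiv track=rewrite | github.com/liu-qingyuan/AncientChinesePhonology_Alphafold | src/pgdn/data/build_acp.py | split_slots
-- ===== SOURCE A (Python) =====
-- from typing import Dict, List, Optional, Tuple
--
-- def split_slots(pron: str) -> Dict[str, Optional[str]]:
--     parts = [p.strip() for p in pron.split("-") if p.strip()]
--     slots: Dict[str, Optional[str]] = {"I": None, "M": None, "N": None, "C": None}
--     if not parts:
--         return slots
--     if len(parts) == 1:
--         slots["N"] = parts[0]
--         return slots
--     if len(parts) == 2:
--         slots["I"] = parts[0]
--         slots["N"] = parts[1]
--         return slots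
--     slots["I"] = parts[0]
--     slots["M"] = parts[1]
--     slots["N"] = parts[2]
--     if len(parts) >= 4:
--         slots["C"] = parts[3]
--     return slots
-- ===== SOURCE B (Python) =====
-- def split_slots(pron):
--     parts = [p.strip() for p in pron.split("-") if p.strip()]
--     templates = {0: [], 1: ["N"], 2: ["I", "N"], 3: ["I", "M", "N"]}
--     names = templates.get(len(parts), ["I", "M", "N", "C"])
--     slots = {"I": None, "M": None, "N": None, "C": None}
--     for name, value in zip(names, parts):
--         slots[name] = value
--     return slots
-- ===== Notes on version B (the rewrite author's own statement) =====
-- stated objective: idiomatic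
-- what changed: Replaces A's four-way if/elif cascade of hard-coded slot assignments with a count-keyed slot-name template table and one uniform zip-assignment loop over a base all-None dict.
import Mathlib
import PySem

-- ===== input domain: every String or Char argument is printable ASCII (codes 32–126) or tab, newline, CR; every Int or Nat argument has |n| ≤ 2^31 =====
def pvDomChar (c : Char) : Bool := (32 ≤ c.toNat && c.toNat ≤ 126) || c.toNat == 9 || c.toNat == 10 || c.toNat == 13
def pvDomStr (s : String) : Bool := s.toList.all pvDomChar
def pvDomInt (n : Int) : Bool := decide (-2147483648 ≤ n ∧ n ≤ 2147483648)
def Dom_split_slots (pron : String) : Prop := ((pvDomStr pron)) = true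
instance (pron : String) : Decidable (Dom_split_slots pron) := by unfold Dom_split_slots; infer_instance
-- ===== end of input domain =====

-- B replaces A's if/elif cascade by a count-keyed template table and one zip-assignment loop (idiomatic, same cost).

-- ===== PORT A =====
def split_slots (pron : String) : List (String × Option String) :=
  let parts := (((PySem.Str.split? pron "-").getD []).filter (fun p => PySem.Str.strip p ≠ "")).map PySem.Str.strip
  let slots : PySem.Dict String (Option String) :=
    PySem.Dict.ofList [("I", none), ("M", none), ("N", none), ("C", none)]
  if parts = [] then slots.items
  else if parts.length = 1 then
    (slots.insert "N" (some (PySem.List.pyGetD parts 0 ""))).items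
  else if parts.length = 2 then
    ((slots.insert "I" (some (PySem.List.pyGetD parts 0 ""))).insert "N"
       (some (PySem.List.pyGetD parts 1 ""))).items
  else
    let s := ((slots.insert "I" (some (PySem.List.pyGetD parts 0 ""))).insert "M"
       (some (PySem.List.pyGetD parts 1 ""))).insert "N" (some (PySem.List.pyGetD parts 2 ""))
    let s := if parts.length ≥ 4 then s.insert "C" (some (PySem.List.pyGetD parts 3 "")) else s
    s.items

-- ===== PORT B =====
def slotTemplates : PySem.Dict Int (List String) :=
  PySem.Dict.ofList [(0, []), (1, ["N"]), (2, ["I", "N"]), (3, ["I", "M", "N"])]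

def split_slots_alt (pron : String) : List (String × Option String) :=
  let parts := (((PySem.Str.split? pron "-").getD []).filter (fun p => PySem.Str.strip p ≠ "")).map PySem.Str.strip
  let names := slotTemplates.getD (parts.length : Int) ["I", "M", "N", "C"]
  let base : PySem.Dict String (Option String) :=
    PySem.Dict.ofList [("I", none), ("M", none), ("N", none), ("C", none)]
  ((names.zip parts).foldl (fun d nv => d.insert nv.1 (some nv.2)) base).items

-- ===== PRECONDITION & SPEC =====
def Spec_split_slots (pron : String) (out : List (String × Option String)) : Prop := out = split_slots_alt pron
instance (pron : String) (out : List (String × Option String)) : Decidable (Spec_split_slots pron out) := by unfold Spec_split_slots; infer_instance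

-- ===== CLAIM (what is proved, stated in full; the proofs are below) =====
def Claim_equal_split_slots : Prop := ∀ (pron : String), Dom_split_slots pron → Spec_split_slots pron (split_slots pron)

-- ===== LEMMAS AND PROOFS =====
theorem split_slots_core (parts : List String) :
    (if parts = [] then
       (PySem.Dict.ofList [("I", (none : Option String)), ("M", none), ("N", none), ("C", none)]).items
     else if parts.length = 1 then
       ((PySem.Dict.ofList [("I", (none : Option String)), ("M", none), ("N", none), ("C", none)]).insert "N"
          (some (PySem.List.pyGetD parts 0 ""))).items
     else if parts.length = 2 then
       (((PySem.Dict.ofList [("I", (none : Option String)), ("M", none), ("N", none), ("C", none)]).insert "I"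
          (some (PySem.List.pyGetD parts 0 ""))).insert "N" (some (PySem.List.pyGetD parts 1 ""))).items
     else
       let s := (((PySem.Dict.ofList [("I", (none : Option String)), ("M", none), ("N", none), ("C", none)]).insert "I"
          (some (PySem.List.pyGetD parts 0 ""))).insert "M"
          (some (PySem.List.pyGetD parts 1 ""))).insert "N" (some (PySem.List.pyGetD parts 2 ""))
       let s := if parts.length ≥ 4 then s.insert "C" (some (PySem.List.pyGetD parts 3 "")) else s
       s.items)
    =
    (((slotTemplates.getD (parts.length : Int) ["I", "M", "N", "C"]).zip parts).foldl
       (fun d nv => d.insert nv.1 (some nv.2))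
       (PySem.Dict.ofList [("I", (none : Option String)), ("M", none), ("N", none), ("C", none)])).items := by
  match parts with
  | [] => rfl
  | [a] => rfl
  | [a, b] => rfl
  | [a, b, c] => rfl
  | a :: b :: c :: d :: rest =>
      have hc : slotTemplates.contains ((a :: b :: c :: d :: rest).length : Int) = false := by
        have hit : slotTemplates.items = [(0, []), (1, ["N"]), (2, ["I", "N"]), (3, ["I", "M", "N"])] := by decide
        simp [PySem.Dict.contains, hit]
        omega
      rw [PySem.Dict.getD_of_not_contains _ _ hc]
      have h0 : PySem.List.pyGetD (a :: b :: c :: d :: rest) 0 "" = a := by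
        simp [PySem.List.pyGetD_ofNat']
      have h1 : PySem.List.pyGetD (a :: b :: c :: d :: rest) 1 "" = b := by
        simp [PySem.List.pyGetD_ofNat']
      have h2 : PySem.List.pyGetD (a :: b :: c :: d :: rest) 2 "" = c := by
        simp [PySem.List.pyGetD_ofNat']
      have h3 : PySem.List.pyGetD (a :: b :: c :: d :: rest) 3 "" = d := by
        simp [PySem.List.pyGetD_ofNat']
      simp only [h0, h1, h2, h3]
      have hne : ¬ ((a :: b :: c :: d :: rest) = []) := by simp
      rw [if_neg hne]
      rw [if_neg (by simp), if_neg (by simp), if_pos (by simp)]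
      rfl

-- ===== VERDICT (by name: the statement is the Claim_ definition above) =====
theorem split_slots_spec : Claim_equal_split_slots := by
  intro pron _
  unfold Spec_split_slots split_slots split_slots_alt
  exact split_slots_core _
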